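-- pv_equiv track=rewrite | github.com/benjaminyjr17/ccds25-0582-medf | streamlit_app.py | _derive_auto_pareto_search_params
-- ===== SOURCE A (Python) =====
-- import math
--
-- def _round_to_multiple(value: float, multiple: int) -> int:
--     if multiple <= 0:
--         raise ValueError("multiple must be positive.")
--     return int(round(float(value) / multiple) * multiple)
--
-- def _clamp_int(value: int, min_value: int, max_value: int) -> int:
--     return max(min_value, min(max_value, int(value)))
--
-- def _derive_auto_pareto_search_params(budget: int, bias: int) -> tuple[int, int]:
--     explore_weight = float(bias) / 100.0
--     p_raw = 40 + (140 - 40) * explore_weight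
--     population = _clamp_int(_round_to_multiple(p_raw, 5), 20, 150)
--
--     generations = math.floor(int(budget) / max(population, 1))
--     generations = _clamp_int(_round_to_multiple(generations, 5), 20, 200)
--
--     while population * generations > int(budget) and generations > 20:
--         generations -= 5
--
--     if generations == 200 and population * generations <= int(budget):
--         while population < 150 and (population + 5) * generations <= int(budget):
--             population += 5
--
--     while population * generations > int(budget) and generations > 20:
--         generations -= 5
--
--     return population, generations
-- ===== SOURCE B (Python) =====
-- def _derive_auto_pareto_search_params(budget: int, bias: int) -> tuple[int, int]:
--     # population: 40 + bias rounded to the nearest multiple of 5 (no ties possible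
--     # since an integer over 5 never has fractional part .5), clamped to [20, 150]
--     population = max(20, min(150, 5 * ((bias + 42) // 5)))
--     # initial generations: budget // population rounded to a multiple of 5, clamped
--     generations0 = max(20, min(200, 5 * ((budget // population + 2) // 5)))
--     # step down to the largest multiple of 5 fitting the budget, floor at 20
--     generations = max(20, min(generations0, 5 * ((budget // population) // 5)))
--     # the expansion loop only runs when generations stayed at 200 (then it fits);
--     # it grows population to the largest multiple of 5 with population*200 <= budget
--     if generations == 200:
--         population = min(150, 5 * ((budget // 200) // 5))
--     return population, generations
-- ===== Notes on version B (the rewrite author's own statement) =====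
-- stated objective: simpler
-- what changed: Replaces the three while loops (step generations down by 5, expand population by 5, dead second step-down) with direct floor-to-multiple-of-5 arithmetic and replaces the float rounding pipeline with exact integer rounding.
import Mathlib
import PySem

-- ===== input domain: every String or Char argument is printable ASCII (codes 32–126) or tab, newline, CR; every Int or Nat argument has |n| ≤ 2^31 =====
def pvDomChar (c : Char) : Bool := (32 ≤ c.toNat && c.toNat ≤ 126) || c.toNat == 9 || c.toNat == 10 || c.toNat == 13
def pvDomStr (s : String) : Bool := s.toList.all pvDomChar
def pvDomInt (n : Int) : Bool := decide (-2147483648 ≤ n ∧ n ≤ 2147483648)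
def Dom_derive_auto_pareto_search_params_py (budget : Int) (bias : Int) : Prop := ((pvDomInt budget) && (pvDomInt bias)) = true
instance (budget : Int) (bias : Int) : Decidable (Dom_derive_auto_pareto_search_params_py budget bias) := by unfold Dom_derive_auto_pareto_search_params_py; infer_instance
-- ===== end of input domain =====

-- B replaces A's three stepping while-loops by direct floor-to-multiple-of-5 arithmetic (objective: simpler).

-- ===== PORT A =====
-- _round_to_multiple(value, 5): round(value/5) with Python's banker's rounding, times 5.
-- A only calls it with integer-valued floats (p_raw = 40 + bias exactly, and an integer
-- generations count) well below 2^53, where Python's float round(value/5) equals this exact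
-- half-even rounding of the rational x/5 (ties 2*r = 5 are impossible for integer x, but the
-- branch is kept to mirror round's rule literally).
def pvRoundToMultiple5 (x : Int) : Int :=
  let q := PySem.Int.floordiv x 5
  let r := x - q * 5
  let rounded := if 2 * r < 5 then q else if 5 < 2 * r then q + 1 else (if q % 2 = 0 then q else q + 1)
  rounded * 5

def pvClampInt (value minValue maxValue : Int) : Int := max minValue (min maxValue value)

-- 'while population * generations > budget and generations > 20: generations -= 5'
def pyStepDownGen (budget population : Int) (g : Int) : Int :=
  if h : population * g > budget ∧ g > 20 then pyStepDownGen budget population (g - 5) else g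
termination_by (g - 20).toNat
decreasing_by omega

-- 'while population < 150 and (population + 5) * generations <= budget: population += 5'
def pyExpandPop (budget g : Int) (p : Int) : Int :=
  if h : p < 150 ∧ (p + 5) * g ≤ budget then pyExpandPop budget g (p + 5) else p
termination_by (150 - p).toNat
decreasing_by omega

def derive_auto_pareto_search_params_py (budget : Int) (bias : Int) : Int × Int :=
  -- explore_weight = bias/100.0; p_raw = 40 + 100*explore_weight = 40 + bias exactly on Dom
  -- (the two float roundings keep the value within 1e-6 of the integer 40 + bias, which
  -- cannot change the nearest multiple of 5), ported as the exact integer 40 + bias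
  let population := pvClampInt (pvRoundToMultiple5 (40 + bias)) 20 150
  -- math.floor(budget / max(population,1)): float division is exact enough here that its
  -- floor is Python's floor division, ported as floordiv
  let generations0 := PySem.Int.floordiv budget (max population 1)
  let generations1 := pvClampInt (pvRoundToMultiple5 generations0) 20 200
  let generations2 := pyStepDownGen budget population generations1
  let pg : Int × Int :=
    if generations2 = 200 ∧ population * generations2 ≤ budget then
      (pyExpandPop budget generations2 population, generations2)
    else (population, generations2)
  let generations3 := pyStepDownGen budget pg.1 pg.2
  (pg.1, generations3)

-- ===== PORT B =====
def derive_auto_pareto_search_params_py_alt (budget : Int) (bias : Int) : Int × Int :=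
  let population := max 20 (min 150 (5 * PySem.Int.floordiv (bias + 42) 5))
  let generations0 := max 20 (min 200 (5 * PySem.Int.floordiv (PySem.Int.floordiv budget population + 2) 5))
  let generations := max 20 (min generations0 (5 * PySem.Int.floordiv (PySem.Int.floordiv budget population) 5))
  if generations = 200 then
    (min 150 (5 * PySem.Int.floordiv (PySem.Int.floordiv budget 200) 5), generations)
  else (population, generations)

-- ===== PRECONDITION & SPEC =====
def Spec_derive_auto_pareto_search_params_py (budget : Int) (bias : Int) (out : Int × Int) : Prop := out = derive_auto_pareto_search_params_py_alt budget bias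
instance (budget : Int) (bias : Int) (out : Int × Int) : Decidable (Spec_derive_auto_pareto_search_params_py budget bias out) := by unfold Spec_derive_auto_pareto_search_params_py; infer_instance

-- ===== CLAIM (what is proved, stated in full; the proofs are below) =====
def Claim_equal_derive_auto_pareto_search_params_py : Prop := ∀ (budget : Int) (bias : Int), Dom_derive_auto_pareto_search_params_py budget bias → Spec_derive_auto_pareto_search_params_py budget bias (derive_auto_pareto_search_params_py budget bias)

-- ===== LEMMAS AND PROOFS =====

-- Half-even rounding of x/5 to a multiple of 5 is floor((x+2)/5)*5: ties are impossible.
theorem pvRoundToMultiple5_eq (x : Int) :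
    pvRoundToMultiple5 x = 5 * PySem.Int.floordiv (x + 2) 5 := by
  unfold pvRoundToMultiple5
  dsimp only
  rw [PySem.Int.floordiv_eq_ediv_of_pos (by norm_num), PySem.Int.floordiv_eq_ediv_of_pos (by norm_num)]
  split_ifs <;> omega

-- The step-down loop lands on the largest multiple of 5 that is ≤ g and fits the budget, floored at 20.
theorem pyStepDownGen_eq (budget p : Int) (hp : 0 < p) :
    ∀ (g : Int), (5:Int) ∣ g → 20 ≤ g →
      pyStepDownGen budget p g
        = max 20 (min g (5 * PySem.Int.floordiv (PySem.Int.floordiv budget p) 5)) := by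
  have key : ∀ (n : ℕ) (g : Int), (g - 20).toNat ≤ n → (5:Int) ∣ g → 20 ≤ g →
      pyStepDownGen budget p g
        = max 20 (min g (5 * PySem.Int.floordiv (PySem.Int.floordiv budget p) 5)) := by
    intro n
    induction n with
    | zero =>
      intro g hn hd hg
      rw [pyStepDownGen, dif_neg (by omega)]
      have hM := PySem.Int.floordiv_eq_ediv_of_pos (a := PySem.Int.floordiv budget p) (b := 5) (by norm_num)
      omega
    | succ n ih =>
      intro g hn hd hg
      have hbr := PySem.Int.le_floordiv_iff_mul_le (a := budget) (b := p) (q := g) hp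
      have hM := PySem.Int.floordiv_eq_ediv_of_pos (a := PySem.Int.floordiv budget p) (b := 5) (by norm_num)
      rw [pyStepDownGen]
      by_cases h : p * g > budget ∧ g > 20
      · rw [dif_pos h]
        have hlt : PySem.Int.floordiv budget p < g := by
          by_contra hc
          exact absurd (hbr.mp (by omega)) (by rw [mul_comm] at h; omega)
        rw [ih (g - 5) (by omega) (by omega) (by omega)]
        omega
      · rw [dif_neg h]
        by_cases h2 : g ≤ 20
        · omega
        · have hle : g ≤ PySem.Int.floordiv budget p := hbr.mpr (by rw [mul_comm]; omega)
          omega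
  intro g hd hg; exact key (g - 20).toNat g le_rfl hd hg

-- The expansion loop (generations = 200) lands on the largest multiple of 5 ≤ 150 fitting the budget.
theorem pyExpandPop_eq (budget : Int) :
    ∀ (p : Int), (5:Int) ∣ p → p ≤ 150 → p * 200 ≤ budget →
      pyExpandPop budget 200 p
        = min 150 (5 * PySem.Int.floordiv (PySem.Int.floordiv budget 200) 5) := by
  have key : ∀ (n : ℕ) (p : Int), (150 - p).toNat ≤ n → (5:Int) ∣ p → p ≤ 150 → p * 200 ≤ budget →
      pyExpandPop budget 200 p
        = min 150 (5 * PySem.Int.floordiv (PySem.Int.floordiv budget 200) 5) := by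
    have hQ := PySem.Int.floordiv_eq_ediv_of_pos (a := budget) (b := 200) (by norm_num)
    have hM := PySem.Int.floordiv_eq_ediv_of_pos (a := PySem.Int.floordiv budget 200) (b := 5) (by norm_num)
    intro n
    induction n with
    | zero =>
      intro p hn hd hp hfit
      rw [pyExpandPop, dif_neg (by omega)]
      omega
    | succ n ih =>
      intro p hn hd hp hfit
      rw [pyExpandPop]
      by_cases h : p < 150 ∧ (p + 5) * 200 ≤ budget
      · rw [dif_pos h]
        exact ih (p + 5) (by omega) (by omega) (by omega) (by omega)
      · rw [dif_neg h]
        omega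
  intro p hd hp hfit; exact key (150 - p).toNat p le_rfl hd hp hfit

-- ===== VERDICT (by name: the statement is the Claim_ definition above) =====
theorem derive_auto_pareto_search_params_py_spec : Claim_equal_derive_auto_pareto_search_params_py := by
  intro budget bias _hdom
  unfold Spec_derive_auto_pareto_search_params_py
  unfold derive_auto_pareto_search_params_py derive_auto_pareto_search_params_py_alt
  simp only [pvClampInt, pvRoundToMultiple5_eq]
  have harg : (40 : Int) + bias + 2 = bias + 42 := by ring
  rw [harg]
  set p := max 20 (min 150 (5 * PySem.Int.floordiv (bias + 42) 5)) with hpdef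
  have hp5 : (5:Int) ∣ p := by
    have := PySem.Int.floordiv_eq_ediv_of_pos (a := bias + 42) (b := 5) (by norm_num)
    omega
  have hp20 : (20:Int) ≤ p := by omega
  have hp150 : p ≤ 150 := by
    have := PySem.Int.floordiv_eq_ediv_of_pos (a := bias + 42) (b := 5) (by norm_num)
    omega
  have hpmax : max p 1 = p := by omega
  rw [hpmax]
  set q := PySem.Int.floordiv budget p with hqdef
  have hq5 := PySem.Int.floordiv_eq_ediv_of_pos (a := q) (b := 5) (by norm_num : (0:Int) < 5)
  have hq25 := PySem.Int.floordiv_eq_ediv_of_pos (a := q + 2) (b := 5) (by norm_num : (0:Int) < 5)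
  set g0 := max 20 (min 200 (5 * PySem.Int.floordiv (q + 2) 5)) with hg0def
  have hg05 : (5:Int) ∣ g0 := by omega
  have hg020 : (20:Int) ≤ g0 := by omega
  have hg0200 : g0 ≤ 200 := by omega
  rw [pyStepDownGen_eq budget p (by omega) g0 hg05 hg020]
  set M := 5 * PySem.Int.floordiv q 5 with hMdef
  set g1 := max 20 (min g0 M) with hg1def
  have hbr200 := PySem.Int.le_floordiv_iff_mul_le (a := budget) (b := p) (q := 200) (by omega)
  by_cases hgate : g1 = 200
  · -- generations reached 200, hence 200 * p ≤ budget and the expansion loop runs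
    have hfit : p * 200 ≤ budget := by
      rw [mul_comm]
      exact hbr200.mp (by omega)
    rw [if_pos (And.intro hgate (by rw [hgate]; exact hfit)), hgate]
    rw [pyExpandPop_eq budget p hp5 hp150 hfit]
    set p' := min 150 (5 * PySem.Int.floordiv (PySem.Int.floordiv budget 200) 5) with hp'def
    have hQ := PySem.Int.floordiv_eq_ediv_of_pos (a := budget) (b := 200) (by norm_num : (0:Int) < 200)
    have hM2 := PySem.Int.floordiv_eq_ediv_of_pos (a := PySem.Int.floordiv budget 200) (b := 5) (by norm_num : (0:Int) < 5)
    have hfit' : ¬ (p' * 200 > budget ∧ (200:Int) > 20) := by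
      have : p' ≤ PySem.Int.floordiv budget 200 := by omega
      have : p' * 200 ≤ budget := by omega
      omega
    rw [pyStepDownGen, dif_neg hfit']
    simp
  · -- generations below 200: the expansion gate is closed and the last loop is a no-op
    rw [if_neg (by omega)]
    have hstop : ¬ (p * g1 > budget ∧ g1 > 20) := by
      by_cases h2 : g1 ≤ 20
      · omega
      · have h3 : g1 * p ≤ budget :=
          (PySem.Int.le_floordiv_iff_mul_le (a := budget) (b := p) (q := g1) (by omega)).mp (by omega)
        rw [show p * g1 = g1 * p from mul_comm p g1]
        omega
    rw [pyStepDownGen, dif_neg hstop, if_neg (by omega)]
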